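-- pv_equiv track=rewrite | github.com/LasRuinasCirculares/ReasoningLens | backend/open_webui/routers/reasoning_analysis/extractors/sections.py | _split_blockquote_paragraphs
-- ===== SOURCE A (Python) =====
-- from typing import List, Dict, Tuple
--
-- def _split_blockquote_paragraphs(text: str) -> List[str]:
--     """
--     Split blockquote-formatted text into paragraphs.
--
--     Blockquote paragraphs are separated by empty quote lines (just "> " or ">").
--
--     Args:
--         text: Text in blockquote format (lines starting with >)
--
--     Returns:
--         List of paragraph strings (with > prefixes removed)
--     """
--     lines = text.split("\n")
--     paragraphs = []
--     current_paragraph_lines = []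
--
--     for line in lines:
--         # Remove the > prefix if present
--         stripped = line.strip()
--         if stripped.startswith(">"):
--             content = stripped[1:].strip()  # Remove > and leading space
--         else:
--             content = stripped
--
--         # Check if this is an empty line (paragraph separator)
--         if not content:
--             # End current paragraph if we have content
--             if current_paragraph_lines:
--                 paragraphs.append("\n".join(current_paragraph_lines))
--                 current_paragraph_lines = []
--         else:
--             current_paragraph_lines.append(content)
--
--     # Don't forget the last paragraph
--     if current_paragraph_lines:
--         paragraphs.append("\n".join(current_paragraph_lines))
--
--     return paragraphs
-- ===== SOURCE B (Python) =====
-- from typing import List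
--
--
-- def _split_blockquote_paragraphs(text: str) -> List[str]:
--     # Pass 1: normalize every line to its content (strip, drop a leading '>', strip again).
--     contents = []
--     for line in text.split("\n"):
--         s = line.strip()
--         contents.append(s[1:].strip() if s.startswith(">") else s)
--     # Pass 2: group back-to-front: walk the contents from the right; a non-empty
--     # content extends the currently open paragraph buffer, an empty one closes it.
--     # Buffers and the buffer list come out reversed and are flipped once at the end.
--     buffers = []
--     open_para = False
--     for c in reversed(contents):
--         if c == "":
--             open_para = False
--         elif open_para:
--             buffers[-1].append(c)
--         else:
--             buffers.append([c])
--             open_para = True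
--     return ["\n".join(reversed(buf)) for buf in reversed(buffers)]
-- ===== Notes on version B (the rewrite author's own statement) =====
-- stated objective: alternative
-- what changed: Separates per-line normalization into its own first pass and replaces the flush-on-separator accumulator loop with a second pass that groups contents back-to-front (reversed iteration extending buffers, flipped once at the end).
import Mathlib
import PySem

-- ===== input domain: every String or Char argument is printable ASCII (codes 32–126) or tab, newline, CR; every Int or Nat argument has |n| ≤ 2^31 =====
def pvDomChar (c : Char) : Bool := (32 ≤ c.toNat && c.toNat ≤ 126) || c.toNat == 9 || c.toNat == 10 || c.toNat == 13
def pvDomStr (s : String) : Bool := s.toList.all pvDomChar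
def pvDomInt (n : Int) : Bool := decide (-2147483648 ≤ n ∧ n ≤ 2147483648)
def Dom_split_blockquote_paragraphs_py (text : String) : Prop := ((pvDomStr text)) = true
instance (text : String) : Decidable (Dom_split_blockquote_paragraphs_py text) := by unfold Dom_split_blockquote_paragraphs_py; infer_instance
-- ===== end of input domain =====

-- B separates the per-line normalization pass from the grouping pass and builds the
-- paragraph list back-to-front; alternative decomposition, same cost — not claimed faster.

-- ===== PORT A =====

-- line.strip(); drop a leading '>' and strip again — the per-line normalization both
-- Pythons perform (A inline in its loop, B in its first pass)
def pvContent (line : String) : String :=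
  let stripped := PySem.Str.strip line
  if PySem.Str.startswith stripped ">" then
    PySem.Str.strip (PySem.Str.slice stripped (some 1) none)
  else stripped

-- text.split("\n"); the separator is the non-empty literal "\n", so split? never returns none
def pvLines (text : String) : List String :=
  (PySem.Str.split? text "\n").getD []

-- loop body of A: state = (paragraphs, current_paragraph_lines)
def pvStepA (st : List String × List String) (line : String) : List String × List String :=
  let content := pvContent line
  if content = "" then
    if st.2 ≠ [] then (st.1 ++ [PySem.Str.join "\n" st.2], []) else st
  else (st.1, st.2 ++ [content])

def split_blockquote_paragraphs_py (text : String) : List String :=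
  let st := (pvLines text).foldl pvStepA ([], [])
  if st.2 ≠ [] then st.1 ++ [PySem.Str.join "\n" st.2] else st.1

-- ===== PORT B =====

-- loop body of B's second pass (over reversed contents): state = (open_para, buffers);
-- buffers[-1].append(c) / buffers.append([c]) on the Python list
def pvStepB (st : Bool × List (List String)) (c : String) : Bool × List (List String) :=
  if c = "" then (false, st.2)
  else if st.1 then (true, st.2.dropLast ++ [st.2.getLastD [] ++ [c]])
  else (true, st.2 ++ [[c]])

def split_blockquote_paragraphs_py_alt (text : String) : List String :=
  let contents := (pvLines text).foldl (fun acc line => acc ++ [pvContent line]) []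
  let st := contents.reverse.foldl pvStepB (false, [])
  st.2.reverse.map (fun buf => PySem.Str.join "\n" buf.reverse)

-- ===== PRECONDITION & SPEC =====
def Spec_split_blockquote_paragraphs_py (text : String) (out : List String) : Prop := out = split_blockquote_paragraphs_py_alt text
instance (text : String) (out : List String) : Decidable (Spec_split_blockquote_paragraphs_py text out) := by unfold Spec_split_blockquote_paragraphs_py; infer_instance

-- ===== CLAIM (what is proved, stated in full; the proofs are below) =====
def Claim_equal_split_blockquote_paragraphs_py : Prop := ∀ (text : String), Dom_split_blockquote_paragraphs_py text → Spec_split_blockquote_paragraphs_py text (split_blockquote_paragraphs_py text)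

-- ===== LEMMAS AND PROOFS =====

-- reference grouping (structural recursion over the normalized contents, front to back):
-- result = (is the head paragraph still open, paragraphs as line-lists)
def pvGStep (c : String) (r : Bool × List (List String)) : Bool × List (List String) :=
  if c = "" then (false, r.2)
  else if r.1 then (true, (c :: r.2.headD []) :: r.2.tail)
  else (true, [c] :: r.2)

def pvGroup : List String → Bool × List (List String)
  | [] => (false, [])
  | c :: cs => pvGStep c (pvGroup cs)

theorem pvGStep_empty (r : Bool × List (List String)) : pvGStep "" r = (false, r.2) := rfl

theorem pvGroup_cons (c : String) (cs : List String) :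
    pvGroup (c :: cs) = pvGStep c (pvGroup cs) := rfl

theorem pvGroup_open_ne_nil (cs : List String) : (pvGroup cs).1 = true → (pvGroup cs).2 ≠ [] := by
  induction cs with
  | nil => simp [pvGroup]
  | cons c cs ih =>
    rw [pvGroup_cons]
    unfold pvGStep
    split_ifs with h1 h2 <;> simp_all

-- what A's trailing flush computes, against the reference grouping, given pending lines cur
def pvMerge (cur : List String) (r : Bool × List (List String)) : List String :=
  if cur = [] then r.2.map (PySem.Str.join "\n")
  else if r.1 then
    PySem.Str.join "\n" (cur ++ r.2.headD []) :: r.2.tail.map (PySem.Str.join "\n")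
  else PySem.Str.join "\n" cur :: r.2.map (PySem.Str.join "\n")

theorem pvA_fold (cs : List String) : ∀ (ps cur : List String),
    (if (cs.foldl pvStepA (ps, cur)).2 ≠ [] then
       (cs.foldl pvStepA (ps, cur)).1 ++ [PySem.Str.join "\n" (cs.foldl pvStepA (ps, cur)).2]
     else (cs.foldl pvStepA (ps, cur)).1)
    = ps ++ pvMerge cur (pvGroup (cs.map pvContent)) := by
  induction cs with
  | nil =>
    intro ps cur
    by_cases h : cur = [] <;> simp [pvGroup, pvMerge, h]
  | cons c cs ih =>
    intro ps cur
    rw [List.foldl_cons, List.map_cons, pvGroup_cons]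
    by_cases hc : pvContent c = ""
    · by_cases hcur : cur = ([] : List String)
      · rw [show pvStepA (ps, cur) c = (ps, cur) from by simp [pvStepA, hc, hcur]]
        rw [ih ps cur]
        simp [pvMerge, hcur, hc, pvGStep_empty]
      · rw [show pvStepA (ps, cur) c = (ps ++ [PySem.Str.join "\n" cur], [])
              from by simp [pvStepA, hc, hcur]]
        rw [ih (ps ++ [PySem.Str.join "\n" cur]) []]
        simp [pvMerge, hcur, hc, pvGStep_empty, List.append_assoc]
    · rw [show pvStepA (ps, cur) c = (ps, cur ++ [pvContent c]) from by simp [pvStepA, hc]]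
      rw [ih ps (cur ++ [pvContent c])]
      congr 1
      set r := pvGroup (cs.map pvContent) with hr
      have hne := pvGroup_open_ne_nil (cs.map pvContent)
      rw [← hr] at hne
      by_cases hflag : r.1 = true
      · obtain ⟨q, qt, hq⟩ := List.exists_cons_of_ne_nil (hne hflag)
        by_cases hcur : cur = ([] : List String) <;>
          simp [pvMerge, pvGStep, hflag, hq, hcur, hc]
      · by_cases hcur : cur = ([] : List String) <;>
          simp [pvMerge, pvGStep, hflag, hcur, hc]

-- B's fold over the reversed contents, characterized against the reference grouping:
-- same open flag; buffers are the reference paragraphs, each reversed, in reverse order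
theorem pvB_fold (cs : List String) :
    cs.reverse.foldl pvStepB (false, [])
      = ((pvGroup cs).1, ((pvGroup cs).2.map List.reverse).reverse) := by
  rw [List.foldl_reverse]
  induction cs with
  | nil => simp [pvGroup]
  | cons c cs ih =>
    rw [List.foldr_cons, ih, pvGroup_cons]
    unfold pvStepB pvGStep
    by_cases hc : c = ""
    · simp [hc]
    · simp only [hc, reduceIte]
      by_cases hflag : (pvGroup cs).1 = true
      · obtain ⟨q, qt, hq⟩ := List.exists_cons_of_ne_nil (pvGroup_open_ne_nil cs hflag)
        simp [hflag, hq]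
      · simp [hflag]

-- ===== VERDICT (by name: the statement is the Claim_ definition above) =====
theorem split_blockquote_paragraphs_py_spec : Claim_equal_split_blockquote_paragraphs_py := by
  intro text _
  unfold Spec_split_blockquote_paragraphs_py
  show split_blockquote_paragraphs_py text = split_blockquote_paragraphs_py_alt text
  unfold split_blockquote_paragraphs_py split_blockquote_paragraphs_py_alt
  simp only [PySem.List.foldl_append_singleton_eq_map, List.nil_append, pvB_fold]
  rw [pvA_fold (pvLines text) [] []]
  simp [pvMerge, List.map_map, Function.comp_def]
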